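-- pv_equiv track=rewrite | github.com/NKrvavica/AdventofCode2023 | day03.py | parse_numbers_and_positions
-- ===== SOURCE A (Python) =====
-- def parse_numbers_and_positions(row, input_string):
--     result = []
--     current_number = None
--     current_positions = []
--     for i, char in enumerate(input_string):
--         if char.isdigit():
--             if current_number is None:
--                 current_number = int(char)
--                 current_positions = [i]
--             else:
--                 current_number = current_number * 10 + int(char)
--                 current_positions.append(i)
--         else:
--             if current_number is not None:
--                 result.append((current_number, row, current_positions))
--                 current_number = None
--             current_positions = []
--     if current_number is not None:
--         result.append((current_number, row, current_positions))
--     return result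
-- ===== SOURCE B (Python) =====
-- def parse_numbers_and_positions(row, input_string):
--     # Run-based scan: find each maximal digit run and emit it in one step,
--     # instead of A's per-character accumulator state machine.
--     result = []
--     n = len(input_string)
--     i = 0
--     while i < n:
--         if input_string[i].isdigit():
--             j = i
--             while j < n and input_string[j].isdigit():
--                 j += 1
--             result.append((int(input_string[i:j]), row, list(range(i, j))))
--             i = j
--         else:
--             i += 1
--     return result
-- ===== Notes on version B (the rewrite author's own statement) =====
-- stated objective: simpler
-- what changed: Replaces the per-character state machine with an Option accumulator by a run-based scan that finds each maximal digit run, converts its substring and index range in one step.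
import Mathlib
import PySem

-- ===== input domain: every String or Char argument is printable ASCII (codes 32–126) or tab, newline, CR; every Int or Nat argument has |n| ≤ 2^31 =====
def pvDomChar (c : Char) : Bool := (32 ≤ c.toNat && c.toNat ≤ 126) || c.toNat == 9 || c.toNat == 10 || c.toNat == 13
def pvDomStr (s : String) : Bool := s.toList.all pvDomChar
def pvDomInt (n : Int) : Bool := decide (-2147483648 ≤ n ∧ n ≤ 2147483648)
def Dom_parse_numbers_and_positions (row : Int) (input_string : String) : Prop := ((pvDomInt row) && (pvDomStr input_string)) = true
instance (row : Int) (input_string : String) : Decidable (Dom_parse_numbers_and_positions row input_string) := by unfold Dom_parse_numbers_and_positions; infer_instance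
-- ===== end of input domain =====

-- B replaces A's per-character accumulator state machine by a run-based scan that
-- emits each maximal digit run in one step (objective: simpler; same cost).

-- ===== PORT A =====
-- int(char) for a single ASCII digit char (the only case the code reaches)
def pvDigit (c : Char) : Int := (c.toNat : Int) - 48

-- state: (result, current_number, current_positions)
def pvStepA (row : Int)
    (st : List (Int × Int × List Int) × Option Int × List Int)
    (p : Int × Char) : List (Int × Int × List Int) × Option Int × List Int :=
  let (result, current_number, current_positions) := st
  let (i, c) := p
  if PySem.Chars.isdigit c then
    match current_number with
    | none => (result, some (pvDigit c), [i])
    | some n => (result, some (n * 10 + pvDigit c), current_positions ++ [i])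
  else
    match current_number with
    | some n => (result ++ [(n, row, current_positions)], none, [])
    | none => (result, none, [])

def parse_numbers_and_positions (row : Int) (input_string : String) : List (Int × Int × List Int) :=
  let (result, current_number, current_positions) :=
    (PySem.List.enumerate input_string.toList).foldl (pvStepA row) ([], none, [])
  match current_number with
  | some n => result ++ [(n, row, current_positions)]
  | none => result

-- ===== PORT B =====
-- int(s[i:j]) on a maximal digit run, ported as the decimal fold over its digits
def pvRunVal (r : List Char) : Int := r.foldl (fun a c => a * 10 + pvDigit c) 0

-- the while loop of B: at a digit, take the whole maximal run; else advance one char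
def pvGoB (row : Int) (i : Int) : List Char → List (Int × Int × List Int)
  | [] => []
  | c :: l =>
    if PySem.Chars.isdigit c then
      let r := List.takeWhile PySem.Chars.isdigit (c :: l)
      (pvRunVal r, row, (List.range r.length).map (fun (k : Nat) => i + (k : Int))) ::
        pvGoB row (i + r.length) (List.dropWhile PySem.Chars.isdigit (c :: l))
    else
      pvGoB row (i + 1) l
termination_by l => l.length
decreasing_by
  · rw [List.dropWhile_cons_of_pos ‹PySem.Chars.isdigit c = true›]
    exact Nat.lt_succ_of_le (List.length_dropWhile_le _ _)
  · simp

def parse_numbers_and_positions_alt (row : Int) (input_string : String) : List (Int × Int × List Int) :=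
  pvGoB row 0 input_string.toList

-- ===== PRECONDITION & SPEC =====
def Spec_parse_numbers_and_positions (row : Int) (input_string : String) (out : List (Int × Int × List Int)) : Prop := out = parse_numbers_and_positions_alt row input_string
instance (row : Int) (input_string : String) (out : List (Int × Int × List Int)) : Decidable (Spec_parse_numbers_and_positions row input_string out) := by unfold Spec_parse_numbers_and_positions; infer_instance

-- ===== CLAIM (what is proved, stated in full; the proofs are below) =====
def Claim_equal_parse_numbers_and_positions : Prop := ∀ (row : Int) (input_string : String), Dom_parse_numbers_and_positions row input_string → Spec_parse_numbers_and_positions row input_string (parse_numbers_and_positions row input_string)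

-- ===== LEMMAS AND PROOFS =====

-- finish of A's loop
def pvFinish (row : Int) (st : List (Int × Int × List Int) × Option Int × List Int) :
    List (Int × Int × List Int) :=
  match st.2.1 with
  | some n => st.1 ++ [(n, row, st.2.2)]
  | none => st.1

lemma pvGoB_nil (row i : Int) : pvGoB row i [] = [] := by simp [pvGoB]

lemma pvGoB_cons (row i : Int) (c : Char) (l : List Char) :
    pvGoB row i (c :: l) =
      if PySem.Chars.isdigit c then
        (pvRunVal (List.takeWhile PySem.Chars.isdigit (c :: l)), row,
          (List.range (List.takeWhile PySem.Chars.isdigit (c :: l)).length).map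
            (fun (k : Nat) => i + (k : Int))) ::
          pvGoB row (i + (List.takeWhile PySem.Chars.isdigit (c :: l)).length)
            (List.dropWhile PySem.Chars.isdigit (c :: l))
      else pvGoB row (i + 1) l := by
  rw [pvGoB]

-- range shift: positions of a run starting at i = i followed by positions starting at i+1
lemma pvRangeCons (i : Int) (m : Nat) :
    (List.range (m + 1)).map (fun (k : Nat) => i + (k : Int)) =
      i :: (List.range m).map (fun (k : Nat) => i + 1 + (k : Int)) := by
  rw [List.range_succ_eq_map]
  simp only [List.map_cons, List.map_map, Nat.cast_zero, add_zero]
  congr 1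
  apply List.map_congr_left
  intro k _
  simp only [Function.comp_apply]
  push_cast
  ring

-- main invariant, both loop states at once, by strong induction on the list length
lemma pvMain (row : Int) : ∀ (N : Nat) (l : List Char), l.length ≤ N →
    (∀ (i : Int) (acc : List (Int × Int × List Int)) (pos : List Int),
      pvFinish row ((PySem.List.enumerate l i).foldl (pvStepA row) (acc, none, pos)) =
        acc ++ pvGoB row i l) ∧
    (∀ (i : Int) (acc : List (Int × Int × List Int)) (n : Int) (pos : List Int),
      pvFinish row ((PySem.List.enumerate l i).foldl (pvStepA row) (acc, some n, pos)) =
        acc ++ (((List.takeWhile PySem.Chars.isdigit l).foldl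
                    (fun a c => a * 10 + pvDigit c) n, row,
                 pos ++ (List.range (List.takeWhile PySem.Chars.isdigit l).length).map
                    (fun (k : Nat) => i + (k : Int))) ::
                pvGoB row (i + (List.takeWhile PySem.Chars.isdigit l).length)
                  (List.dropWhile PySem.Chars.isdigit l))) := by
  intro N
  induction N with
  | zero =>
    intro l hl
    have : l = [] := List.eq_nil_of_length_eq_zero (Nat.le_zero.mp hl)
    subst this
    constructor
    · intro i acc pos
      simp [PySem.List.enumerate_nil, pvFinish, pvGoB_nil]
    · intro i acc n pos
      simp [PySem.List.enumerate_nil, pvFinish, pvGoB_nil]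
  | succ N ih =>
    intro l hl
    cases l with
    | nil =>
      constructor
      · intro i acc pos
        simp [PySem.List.enumerate_nil, pvFinish, pvGoB_nil]
      · intro i acc n pos
        simp [PySem.List.enumerate_nil, pvFinish, pvGoB_nil]
    | cons c rest =>
      have hrest : rest.length ≤ N := Nat.le_of_succ_le_succ hl
      constructor
      · intro i acc pos
        rw [PySem.List.enumerate_cons, List.foldl_cons]
        by_cases hc : PySem.Chars.isdigit c = true
        · simp only [pvStepA, hc, if_pos]
          rw [(ih rest hrest).2 (i + 1) acc (pvDigit c) [i]]
          rw [pvGoB_cons, if_pos hc, List.takeWhile_cons_of_pos hc,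
            List.dropWhile_cons_of_pos hc]
          simp only [List.length_cons, pvRangeCons,
            List.singleton_append]
          congr 3
          · simp [pvRunVal, pvDigit]
          · push_cast
            ring
        · simp only [pvStepA, if_neg hc]
          rw [(ih rest hrest).1 (i + 1) acc []]
          rw [pvGoB_cons, if_neg hc]
      · intro i acc n pos
        rw [PySem.List.enumerate_cons, List.foldl_cons]
        by_cases hc : PySem.Chars.isdigit c = true
        · simp only [pvStepA, hc, if_pos]
          rw [(ih rest hrest).2 (i + 1) acc (n * 10 + pvDigit c) (pos ++ [i])]
          rw [List.takeWhile_cons_of_pos hc, List.dropWhile_cons_of_pos hc]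
          simp only [List.length_cons, pvRangeCons,
            List.append_assoc, List.singleton_append]
          congr 2
          push_cast
          ring_nf
        · simp only [pvStepA, if_neg hc]
          rw [(ih rest hrest).1 (i + 1) (acc ++ [(n, row, pos)]) []]
          rw [List.takeWhile_cons_of_neg hc,
            List.dropWhile_cons_of_neg hc]
          rw [pvGoB_cons, if_neg hc]
          simp

-- ===== VERDICT (by name: the statement is the Claim_ definition above) =====
theorem parse_numbers_and_positions_spec : Claim_equal_parse_numbers_and_positions := by
  intro row s _
  unfold Spec_parse_numbers_and_positions parse_numbers_and_positions parse_numbers_and_positions_alt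
  have h := (pvMain row s.toList.length s.toList le_rfl).1 0 [] []
  simpa [pvFinish] using h
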